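-- pv_equiv track=rewrite | github.com/brew0915/str_drivers_day | app.py | detectar_coluna_telefone
-- ===== SOURCE A (Python) =====
-- from typing import Tuple, List
--
-- def detectar_coluna_telefone(cols: List[str]) -> str:
--     """Procura nomes comuns para telefone e retorna o nome normalizado."""
--     cand = [c.lower().strip() for c in cols]
--     if "phone_number" in cand:
--         return cols[cand.index("phone_number")]
--     for opt in ("phone number", "phone", "telefone", "telefone_celular", "celular"):
--         if opt in cand:
--             return cols[cand.index(opt)]
--     # fallback: procura coluna que contenha 'phone' ou 'tel'
--     for i, c in enumerate(cand):
--         if "phone" in c or "tel" in c: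
--             return cols[i]
--     return None
-- ===== SOURCE B (Python) =====
-- def detectar_coluna_telefone(cols):
--     """Procura nomes comuns para telefone e retorna o nome normalizado."""
--     RANK = {"phone_number": 0, "phone number": 1, "phone": 2,
--             "telefone": 3, "telefone_celular": 4, "celular": 5}
--     best = None  # (rank, index, original column name)
--     for i, c in enumerate(cols):
--         n = c.lower().strip()
--         r = RANK.get(n)
--         if r is None and ("phone" in n or "tel" in n):
--             r = 6
--         if r is not None and (best is None or r < best[0]):
--             best = (r, i, c)
--     return best[2] if best is not None else None
-- ===== Notes on version B (the rewrite author's own statement) =====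
-- stated objective: alternative
-- what changed: Replaced A's phased membership tests plus repeated .index scans (up to seven passes over the columns) by a single argmin pass that assigns each normalized column a priority rank (0-5 exact names, 6 substring fallback) and keeps the column with the strictly lowest rank, earliest index on ties.
import Mathlib
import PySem

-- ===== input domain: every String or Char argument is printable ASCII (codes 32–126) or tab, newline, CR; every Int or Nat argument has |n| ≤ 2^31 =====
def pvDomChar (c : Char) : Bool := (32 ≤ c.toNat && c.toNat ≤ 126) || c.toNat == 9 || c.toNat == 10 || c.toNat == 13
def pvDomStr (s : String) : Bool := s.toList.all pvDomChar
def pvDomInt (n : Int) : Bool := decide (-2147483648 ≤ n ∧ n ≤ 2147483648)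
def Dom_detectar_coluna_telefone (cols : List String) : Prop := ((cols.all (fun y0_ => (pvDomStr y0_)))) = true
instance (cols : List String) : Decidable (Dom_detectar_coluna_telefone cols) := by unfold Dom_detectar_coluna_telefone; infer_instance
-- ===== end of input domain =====

-- B replaces A's phased membership tests + repeated .index scans by one argmin pass over
-- rank-scored normalized columns (objective: alternative, same asymptotic cost).

-- ===== PORT A =====
-- fallback loop: 'for i, c in enumerate(cand): if "phone" in c or "tel" in c: return cols[i]'
def pvAFallback (cols : List String) : List (Int × String) → Option String
  | [] => none
  | (i, c) :: rest =>
    if PySem.Str.isIn "phone" c || PySem.Str.isIn "tel" c then PySem.List.pyGet? cols i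
    else pvAFallback cols rest

-- 'for opt in (...): if opt in cand: return cols[cand.index(opt)]'
def pvAForOpts (cols cand : List String) : List String → Option String
  | [] => pvAFallback cols (PySem.List.enumerate cand)
  | opt :: rest =>
    if cand.contains opt then
      (PySem.List.index? cand opt).bind (fun i => PySem.List.pyGet? cols (i : Int))
    else pvAForOpts cols cand rest

def detectar_coluna_telefone (cols : List String) : Option String :=
  let cand := cols.map (fun c => PySem.Str.strip (PySem.Str.lower c))
  if cand.contains "phone_number" then
    (PySem.List.index? cand "phone_number").bind (fun i => PySem.List.pyGet? cols (i : Int))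
  else
    pvAForOpts cols cand ["phone number", "phone", "telefone", "telefone_celular", "celular"]

-- ===== PORT B =====
def pvRankDict : PySem.Dict String Int :=
  PySem.Dict.ofList [("phone_number", 0), ("phone number", 1), ("phone", 2),
                     ("telefone", 3), ("telefone_celular", 4), ("celular", 5)]

def detectar_coluna_telefone_alt (cols : List String) : Option String :=
  let best :=
    (PySem.List.enumerate cols).foldl
      (fun (best : Option (Int × Int × String)) (ic : Int × String) =>
        let n := PySem.Str.strip (PySem.Str.lower ic.2)
        let r0 := PySem.Dict.get? pvRankDict n
        let r := if r0.isNone && (PySem.Str.isIn "phone" n || PySem.Str.isIn "tel" n)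
                 then some (6 : Int) else r0
        match r, best with
        | none, _ => best
        | some rv, none => some (rv, ic.1, ic.2)
        | some rv, some b => if rv < b.1 then some (rv, ic.1, ic.2) else some b)
      none
  best.map (fun b => b.2.2)

-- ===== PRECONDITION & SPEC =====
def Spec_detectar_coluna_telefone (cols : List String) (out : Option String) : Prop := out = detectar_coluna_telefone_alt cols
instance (cols : List String) (out : Option String) : Decidable (Spec_detectar_coluna_telefone cols out) := by unfold Spec_detectar_coluna_telefone; infer_instance

-- ===== CLAIM (what is proved, stated in full; the proofs are below) =====
def Claim_equal_detectar_coluna_telefone : Prop := ∀ (cols : List String), Dom_detectar_coluna_telefone cols → Spec_detectar_coluna_telefone cols (detectar_coluna_telefone cols)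

-- ===== LEMMAS AND PROOFS =====

def pvNorm (c : String) : String := PySem.Str.strip (PySem.Str.lower c)

def pvPred (n : String) : Bool := PySem.Str.isIn "phone" n || PySem.Str.isIn "tel" n

-- the priority score B effectively assigns to a normalized name
def pvRk (n : String) : Option Int :=
  if "phone_number" == n then some 0
  else if "phone number" == n then some 1
  else if "phone" == n then some 2
  else if "telefone" == n then some 3
  else if "telefone_celular" == n then some 4
  else if "celular" == n then some 5
  else if pvPred n then some 6
  else none

def pvEntry (ic : Int × String) : Option (Int × Int × String) :=
  (pvRk (pvNorm ic.2)).map (fun r => (r, ic.1, ic.2))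

def pvMerge : Option (Int × Int × String) → Option (Int × Int × String) → Option (Int × Int × String)
  | b, none => b
  | none, some e => some e
  | some b, some e => if e.1 < b.1 then some e else some b

def pvBestOf (l : List (Int × String)) : Option (Int × Int × String) :=
  l.foldr (fun ic acc => pvMerge (pvEntry ic) acc) none

lemma pvMerge_none_right (a : Option (Int × Int × String)) : pvMerge a none = a := by
  cases a <;> rfl

lemma pvMerge_none_left (a : Option (Int × Int × String)) : pvMerge none a = a := by
  cases a <;> rfl

lemma pvMerge_assoc (a b c : Option (Int × Int × String)) :
    pvMerge (pvMerge a b) c = pvMerge a (pvMerge b c) := by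
  cases a <;> cases b <;> cases c <;> simp only [pvMerge] <;> split_ifs <;>
    first | rfl | (simp only [pvMerge]; split_ifs <;> first | rfl | omega)

lemma pvRank_get (n : String) :
    PySem.Dict.get? pvRankDict n =
      (if "phone_number" == n then some 0
       else if "phone number" == n then some 1
       else if "phone" == n then some 2
       else if "telefone" == n then some 3
       else if "telefone_celular" == n then some 4
       else if "celular" == n then some 5
       else none) := by
  have h : pvRankDict = PySem.Dict.mk [("phone_number", 0), ("phone number", 1), ("phone", 2),
      ("telefone", 3), ("telefone_celular", 4), ("celular", 5)] := by decide
  rw [h]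
  simp only [PySem.Dict.get?_mk_cons]
  split_ifs <;> rfl

lemma pvStep_eq (best : Option (Int × Int × String)) (ic : Int × String) :
    (let n := PySem.Str.strip (PySem.Str.lower ic.2)
     let r0 := PySem.Dict.get? pvRankDict n
     let r := if r0.isNone && (PySem.Str.isIn "phone" n || PySem.Str.isIn "tel" n)
              then some (6 : Int) else r0
     match r, best with
     | none, _ => best
     | some rv, none => some (rv, ic.1, ic.2)
     | some rv, some b => if rv < b.1 then some (rv, ic.1, ic.2) else some b)
    = pvMerge best (pvEntry ic) := by
  simp only [pvEntry, pvRk, pvNorm, pvPred, pvRank_get]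
  split_ifs with h1 h2 h3 h4 h5 h6 h7 <;> cases best <;>
    simp_all [pvMerge, Option.isNone]

lemma pvBestOf_cons (x : Int × String) (l : List (Int × String)) :
    pvBestOf (x :: l) = pvMerge (pvEntry x) (pvBestOf l) := rfl

lemma pvBestOf_enum_cons (c : String) (t : List String) (s : Int) :
    pvBestOf (PySem.List.enumerate (c :: t) s)
      = pvMerge (pvEntry (s, c)) (pvBestOf (PySem.List.enumerate t (s + 1))) := by
  rw [PySem.List.enumerate_cons]; rfl

lemma pvFoldl_merge (l : List (Int × String)) (b : Option (Int × Int × String)) :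
    l.foldl (fun best ic => pvMerge best (pvEntry ic)) b = pvMerge b (pvBestOf l) := by
  induction l generalizing b with
  | nil => simp [pvBestOf, pvMerge_none_right]
  | cons x t ih =>
    rw [List.foldl_cons, ih, pvBestOf_cons, ← pvMerge_assoc]

lemma pvAlt_eq (cols : List String) :
    detectar_coluna_telefone_alt cols
      = (pvBestOf (PySem.List.enumerate cols)).map (fun b => b.2.2) := by
  unfold detectar_coluna_telefone_alt
  have h : (PySem.List.enumerate cols).foldl
      (fun (best : Option (Int × Int × String)) (ic : Int × String) =>
        let n := PySem.Str.strip (PySem.Str.lower ic.2)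
        let r0 := PySem.Dict.get? pvRankDict n
        let r := if r0.isNone && (PySem.Str.isIn "phone" n || PySem.Str.isIn "tel" n)
                 then some (6 : Int) else r0
        match r, best with
        | none, _ => best
        | some rv, none => some (rv, ic.1, ic.2)
        | some rv, some b => if rv < b.1 then some (rv, ic.1, ic.2) else some b)
      none
      = (PySem.List.enumerate cols).foldl (fun best ic => pvMerge best (pvEntry ic)) none := by
    have hf : (fun (best : Option (Int × Int × String)) (ic : Int × String) =>
        let n := PySem.Str.strip (PySem.Str.lower ic.2)
        let r0 := PySem.Dict.get? pvRankDict n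
        let r := if r0.isNone && (PySem.Str.isIn "phone" n || PySem.Str.isIn "tel" n)
                 then some (6 : Int) else r0
        match r, best with
        | none, _ => best
        | some rv, none => some (rv, ic.1, ic.2)
        | some rv, some b => if rv < b.1 then some (rv, ic.1, ic.2) else some b)
        = (fun best ic => pvMerge best (pvEntry ic)) := by
      funext b ic
      exact pvStep_eq b ic
    rw [hf]
  rw [h, pvFoldl_merge, pvMerge_none_left]

-- bestOf respects a lower bound on the ranks present
lemma pvBestOf_lb (cols : List String) (s r : Int)
    (h : ∀ c ∈ cols, ∀ r', pvRk (pvNorm c) = some r' → r ≤ r') :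
    ∀ e, pvBestOf (PySem.List.enumerate cols s) = some e → r ≤ e.1 := by
  induction cols generalizing s with
  | nil => intro e he; simp [PySem.List.enumerate_nil, pvBestOf] at he
  | cons c t ih =>
    intro e he
    rw [pvBestOf_enum_cons] at he
    have ht := ih (s + 1) (fun c hc => h c (List.mem_cons_of_mem _ hc))
    rcases hrk : pvRk (pvNorm c) with _ | rc
    · rw [show pvEntry (s, c) = none by simp [pvEntry, hrk], pvMerge_none_left] at he
      exact ht e he
    · have hrc : r ≤ rc := h c List.mem_cons_self rc hrk
      rw [show pvEntry (s, c) = some (rc, s, c) by simp [pvEntry, hrk]] at he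
      rcases hb : pvBestOf (PySem.List.enumerate t (s + 1)) with _ | eb
      · rw [hb, pvMerge_none_right] at he
        cases he; exact hrc
      · rw [hb] at he
        simp only [pvMerge] at he
        split_ifs at he <;> cases he
        · exact ht _ hb
        · exact hrc

lemma pvBestOf_none (cols : List String) (s : Int)
    (h : ∀ c ∈ cols, pvRk (pvNorm c) = none) :
    pvBestOf (PySem.List.enumerate cols s) = none := by
  induction cols generalizing s with
  | nil => simp [PySem.List.enumerate_nil, pvBestOf]
  | cons c t ih =>
    rw [pvBestOf_enum_cons,
        show pvEntry (s, c) = none by simp [pvEntry, h c List.mem_cons_self],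
        pvMerge_none_left]
    exact ih (s + 1) (fun c hc => h c (List.mem_cons_of_mem _ hc))

set_option maxHeartbeats 1000000 in
lemma pvBestOf_eq (pre : List String) (x : String) (suf : List String) (s r : Int)
    (hx : pvRk (pvNorm x) = some r)
    (hpre : ∀ c ∈ pre, ∀ r', pvRk (pvNorm c) = some r' → r < r')
    (hsuf : ∀ c ∈ suf, ∀ r', pvRk (pvNorm c) = some r' → r ≤ r') :
    pvBestOf (PySem.List.enumerate (pre ++ x :: suf) s) = some (r, s + pre.length, x) := by
  induction pre generalizing s with
  | nil =>
    rw [List.nil_append, pvBestOf_enum_cons,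
        show pvEntry (s, x) = some (r, s, x) by simp [pvEntry, hx]]
    have hlb := pvBestOf_lb suf (s + 1) r hsuf
    rcases hb : pvBestOf (PySem.List.enumerate suf (s + 1)) with _ | eb
    · rw [pvMerge_none_right]
      norm_num
    · have hrle := hlb eb hb
      simp only [pvMerge]
      rw [if_neg (by omega)]
      norm_num
  | cons c t ih =>
    rw [List.cons_append, pvBestOf_enum_cons,
        show (s + (((c :: t).length : Nat) : Int)) = (s + 1) + ((t.length : Nat) : Int) by
          simp only [List.length_cons]; push_cast; ring]
    have iht := ih (s + 1) (fun c hc => hpre c (List.mem_cons_of_mem _ hc))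
    rcases hrk : pvRk (pvNorm c) with _ | rc
    · rw [show pvEntry (s, c) = none by simp [pvEntry, hrk], pvMerge_none_left]
      exact iht
    · have hrc : r < rc := hpre c List.mem_cons_self rc hrk
      rw [show pvEntry (s, c) = some (rc, s, c) by simp [pvEntry, hrk], iht]
      simp only [pvMerge]
      rw [if_pos (by omega)]

-- facts about pvRk
lemma pvRk_bounds (n : String) (r : Int) (h : pvRk n = some r) : 0 ≤ r ∧ r ≤ 6 := by
  unfold pvRk at h
  split_ifs at h <;> cases h <;> omega

lemma pvRk_eq0 (n : String) : pvRk n = some 0 ↔ n = "phone_number" := by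
  constructor
  · unfold pvRk; split_ifs <;> intro h <;> simp_all
  · rintro rfl; decide

lemma pvRk_eq1 (n : String) : pvRk n = some 1 ↔ n = "phone number" := by
  constructor
  · unfold pvRk; split_ifs <;> intro h <;> simp_all
  · rintro rfl; decide

lemma pvRk_eq2 (n : String) : pvRk n = some 2 ↔ n = "phone" := by
  constructor
  · unfold pvRk; split_ifs <;> intro h <;> simp_all
  · rintro rfl; decide

lemma pvRk_eq3 (n : String) : pvRk n = some 3 ↔ n = "telefone" := by
  constructor
  · unfold pvRk; split_ifs <;> intro h <;> simp_all
  · rintro rfl; decide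

lemma pvRk_eq4 (n : String) : pvRk n = some 4 ↔ n = "telefone_celular" := by
  constructor
  · unfold pvRk; split_ifs <;> intro h <;> simp_all
  · rintro rfl; decide

lemma pvRk_eq5 (n : String) : pvRk n = some 5 ↔ n = "celular" := by
  constructor
  · unfold pvRk; split_ifs <;> intro h <;> simp_all
  · rintro rfl; decide

lemma pvRk_none_of (n : String) (hp : pvPred n = false)
    (h1 : n ≠ "phone_number") (h2 : n ≠ "phone number") (h3 : n ≠ "phone")
    (h4 : n ≠ "telefone") (h5 : n ≠ "telefone_celular") (h6 : n ≠ "celular") :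
    pvRk n = none := by
  unfold pvRk; split_ifs <;> simp_all

lemma pvRk_six_of (n : String) (hp : pvPred n = true)
    (h1 : n ≠ "phone_number") (h2 : n ≠ "phone number") (h3 : n ≠ "phone")
    (h4 : n ≠ "telefone") (h5 : n ≠ "telefone_celular") (h6 : n ≠ "celular") :
    pvRk n = some 6 := by
  unfold pvRk; split_ifs <;> simp_all

-- the fallback loop on a decomposed list
lemma pvFallback_some (cols pre : List String) (x : String) (suf : List String) (s : Int)
    (hpre : ∀ c ∈ pre, pvPred c = false) (hx : pvPred x = true) :
    pvAFallback cols (PySem.List.enumerate (pre ++ x :: suf) s)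
      = PySem.List.pyGet? cols (s + pre.length) := by
  induction pre generalizing s with
  | nil =>
    simp only [List.nil_append, PySem.List.enumerate_cons, pvAFallback]
    unfold pvPred at hx
    rw [if_pos hx]
    norm_num
  | cons c t ih =>
    simp only [List.cons_append, PySem.List.enumerate_cons, pvAFallback]
    have hc := hpre c List.mem_cons_self
    unfold pvPred at hc
    rw [if_neg (by simp only [hc]; decide), ih (s + 1) (fun c hc => hpre c (List.mem_cons_of_mem _ hc))]
    congr 1
    simp only [List.length_cons]
    push_cast
    ring_nf

lemma pvFallback_none (cols cand : List String) (s : Int)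
    (h : ∀ c ∈ cand, pvPred c = false) :
    pvAFallback cols (PySem.List.enumerate cand s) = none := by
  induction cand generalizing s with
  | nil => simp [PySem.List.enumerate_nil, pvAFallback]
  | cons c t ih =>
    simp only [PySem.List.enumerate_cons, pvAFallback]
    have hc := h c List.mem_cons_self
    unfold pvPred at hc
    rw [if_neg (by simp only [hc]; decide)]
    exact ih (s + 1) (fun c hc => h c (List.mem_cons_of_mem _ hc))

-- split a list at the first element satisfying p (or none satisfies)
lemma pvFirstSplit {α : Type} (p : α → Bool) (l : List α) :
    (∀ c ∈ l, p c = false) ∨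
    ∃ pre x suf, l = pre ++ x :: suf ∧ (∀ c ∈ pre, p c = false) ∧ p x = true := by
  induction l with
  | nil => exact Or.inl (by simp)
  | cons c t ih =>
    rcases hp : p c with _ | _
    · rcases ih with h | ⟨pre, x, suf, hdec, hpre, hx⟩
      · exact Or.inl (by
          intro y hy
          rcases List.mem_cons.mp hy with rfl | hy
          · exact hp
          · exact h y hy)
      · refine Or.inr ⟨c :: pre, x, suf, by rw [hdec, List.cons_append], ?_, hx⟩
        intro y hy
        rcases List.mem_cons.mp hy with rfl | hy
        · exact hp
        · exact hpre y hy
    · exact Or.inr ⟨[], c, t, rfl, by simp, hp⟩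

-- shared handler for the six exact phases
lemma pvPhase (cols : List String) (opt : String) (r : Int) (k : Nat)
    (hr : ∀ n, pvRk n = some r ↔ n = opt)
    (hlow : ∀ c ∈ cols, ∀ r', pvRk (pvNorm c) = some r' → ¬ r' < r)
    (hidx : PySem.List.index? (cols.map pvNorm) opt = some k) :
    PySem.List.pyGet? cols (k : Int) = detectar_coluna_telefone_alt cols := by
  rw [PySem.List.index?_eq_some_iff] at hidx
  obtain ⟨pre, suf, hdec, hlen, hmem⟩ := hidx
  rw [List.map_eq_append_iff] at hdec
  obtain ⟨preC, rest, hcols, hpreC, hrest⟩ := hdec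
  rw [List.map_eq_cons_iff] at hrest
  obtain ⟨x, sufC, hrest2, hnx, hsufC⟩ := hrest
  subst hrest2
  have hkl : k = preC.length := by
    rw [← hlen, ← hpreC, List.length_map]
  have hA : PySem.List.pyGet? cols (k : Int) = some x := by
    rw [hcols, hkl]
    exact PySem.List.pyGet?_append_length preC sufC x
  rw [hA, pvAlt_eq, hcols]
  rw [pvBestOf_eq preC x sufC 0 r ((hr (pvNorm x)).mpr hnx)
      (fun c hc r' hr' => by
        have h1 := hlow c (hcols ▸ List.mem_append_left _ hc) r' hr'
        have h2 : r' ≠ r := by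
          intro h
          subst h
          have := (hr (pvNorm c)).mp hr'
          exact hmem (this ▸ hpreC ▸ List.mem_map_of_mem hc)
        omega)
      (fun c hc r' hr' => by
        have h1 := hlow c (hcols ▸ List.mem_append_right _ (List.mem_cons_of_mem _ hc)) r' hr'
        omega)]
  rfl

lemma pvIndex_of_contains (cand : List String) (v : String) (h : cand.contains v = true) :
    ∃ k, PySem.List.index? cand v = some k := by
  rw [← Option.isSome_iff_exists, PySem.List.index?_isSome_iff]
  simpa using h

lemma pvNotMem_of_contains (cand : List String) (v : String) (h : cand.contains v = false) :
    v ∉ cand := by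
  simpa using h

-- ===== VERDICT (by name: the statement is the Claim_ definition above) =====
theorem detectar_coluna_telefone_spec : Claim_equal_detectar_coluna_telefone := by
  intro cols _
  unfold Spec_detectar_coluna_telefone detectar_coluna_telefone
  have hnorm : (fun c => PySem.Str.strip (PySem.Str.lower c)) = pvNorm := rfl
  simp only [hnorm]
  set cand := cols.map pvNorm with hcand
  by_cases h0 : cand.contains "phone_number" = true
  · rw [if_pos h0]
    obtain ⟨k, hk⟩ := pvIndex_of_contains cand "phone_number" h0
    rw [hk]
    simp only [Option.bind_some]
    exact pvPhase cols "phone_number" 0 k pvRk_eq0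
      (fun c hc r' hr' hlt => by have := pvRk_bounds _ _ hr'; omega) hk
  · rw [if_neg h0]
    rw [Bool.not_eq_true] at h0
    simp only [pvAForOpts]
    by_cases h1 : cand.contains "phone number" = true
    · rw [if_pos h1]
      obtain ⟨k, hk⟩ := pvIndex_of_contains cand "phone number" h1
      rw [hk]
      simp only [Option.bind_some]
      refine pvPhase cols "phone number" 1 k pvRk_eq1 ?_ hk
      intro c hc r' hr' hlt
      obtain ⟨hb0, hb6⟩ := pvRk_bounds _ _ hr'
      have : r' = 0 := by omega
      subst this
      exact pvNotMem_of_contains cand _ h0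
        (((pvRk_eq0 _).mp hr') ▸ List.mem_map_of_mem hc)
    · rw [if_neg h1]
      rw [Bool.not_eq_true] at h1
      
      by_cases h2 : cand.contains "phone" = true
      · rw [if_pos h2]
        obtain ⟨k, hk⟩ := pvIndex_of_contains cand "phone" h2
        rw [hk]
        simp only [Option.bind_some]
        refine pvPhase cols "phone" 2 k pvRk_eq2 ?_ hk
        intro c hc r' hr' hlt
        obtain ⟨hb0, hb6⟩ := pvRk_bounds _ _ hr'
        interval_cases r'
        · exact pvNotMem_of_contains cand _ h0
            (((pvRk_eq0 _).mp hr') ▸ List.mem_map_of_mem hc)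
        · exact pvNotMem_of_contains cand _ h1
            (((pvRk_eq1 _).mp hr') ▸ List.mem_map_of_mem hc)
      · rw [if_neg h2]
        rw [Bool.not_eq_true] at h2
        
        by_cases h3 : cand.contains "telefone" = true
        · rw [if_pos h3]
          obtain ⟨k, hk⟩ := pvIndex_of_contains cand "telefone" h3
          rw [hk]
          simp only [Option.bind_some]
          refine pvPhase cols "telefone" 3 k pvRk_eq3 ?_ hk
          intro c hc r' hr' hlt
          obtain ⟨hb0, hb6⟩ := pvRk_bounds _ _ hr'
          interval_cases r'
          · exact pvNotMem_of_contains cand _ h0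
              (((pvRk_eq0 _).mp hr') ▸ List.mem_map_of_mem hc)
          · exact pvNotMem_of_contains cand _ h1
              (((pvRk_eq1 _).mp hr') ▸ List.mem_map_of_mem hc)
          · exact pvNotMem_of_contains cand _ h2
              (((pvRk_eq2 _).mp hr') ▸ List.mem_map_of_mem hc)
        · rw [if_neg h3]
          rw [Bool.not_eq_true] at h3
          
          by_cases h4 : cand.contains "telefone_celular" = true
          · rw [if_pos h4]
            obtain ⟨k, hk⟩ := pvIndex_of_contains cand "telefone_celular" h4
            rw [hk]
            simp only [Option.bind_some]
            refine pvPhase cols "telefone_celular" 4 k pvRk_eq4 ?_ hk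
            intro c hc r' hr' hlt
            obtain ⟨hb0, hb6⟩ := pvRk_bounds _ _ hr'
            interval_cases r'
            · exact pvNotMem_of_contains cand _ h0
                (((pvRk_eq0 _).mp hr') ▸ List.mem_map_of_mem hc)
            · exact pvNotMem_of_contains cand _ h1
                (((pvRk_eq1 _).mp hr') ▸ List.mem_map_of_mem hc)
            · exact pvNotMem_of_contains cand _ h2
                (((pvRk_eq2 _).mp hr') ▸ List.mem_map_of_mem hc)
            · exact pvNotMem_of_contains cand _ h3
                (((pvRk_eq3 _).mp hr') ▸ List.mem_map_of_mem hc)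
          · rw [if_neg h4]
            rw [Bool.not_eq_true] at h4
            
            by_cases h5 : cand.contains "celular" = true
            · rw [if_pos h5]
              obtain ⟨k, hk⟩ := pvIndex_of_contains cand "celular" h5
              rw [hk]
              simp only [Option.bind_some]
              refine pvPhase cols "celular" 5 k pvRk_eq5 ?_ hk
              intro c hc r' hr' hlt
              obtain ⟨hb0, hb6⟩ := pvRk_bounds _ _ hr'
              interval_cases r'
              · exact pvNotMem_of_contains cand _ h0
                  (((pvRk_eq0 _).mp hr') ▸ List.mem_map_of_mem hc)
              · exact pvNotMem_of_contains cand _ h1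
                  (((pvRk_eq1 _).mp hr') ▸ List.mem_map_of_mem hc)
              · exact pvNotMem_of_contains cand _ h2
                  (((pvRk_eq2 _).mp hr') ▸ List.mem_map_of_mem hc)
              · exact pvNotMem_of_contains cand _ h3
                  (((pvRk_eq3 _).mp hr') ▸ List.mem_map_of_mem hc)
              · exact pvNotMem_of_contains cand _ h4
                  (((pvRk_eq4 _).mp hr') ▸ List.mem_map_of_mem hc)
            · rw [if_neg h5]
              rw [Bool.not_eq_true] at h5
              
              -- fallback phase: no exact candidate anywhere in cand
              have hne : ∀ c ∈ cols, pvNorm c ≠ "phone_number" ∧ pvNorm c ≠ "phone number" ∧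
                  pvNorm c ≠ "phone" ∧ pvNorm c ≠ "telefone" ∧
                  pvNorm c ≠ "telefone_celular" ∧ pvNorm c ≠ "celular" := by
                intro c hc
                refine ⟨?_, ?_, ?_, ?_, ?_, ?_⟩ <;> intro h <;>
                  [exact pvNotMem_of_contains cand _ h0 (h ▸ List.mem_map_of_mem hc);
                   exact pvNotMem_of_contains cand _ h1 (h ▸ List.mem_map_of_mem hc);
                   exact pvNotMem_of_contains cand _ h2 (h ▸ List.mem_map_of_mem hc);
                   exact pvNotMem_of_contains cand _ h3 (h ▸ List.mem_map_of_mem hc);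
                   exact pvNotMem_of_contains cand _ h4 (h ▸ List.mem_map_of_mem hc);
                   exact pvNotMem_of_contains cand _ h5 (h ▸ List.mem_map_of_mem hc)]
              rcases pvFirstSplit (fun c => pvPred (pvNorm c)) cols with hall | ⟨pre, x, suf, hdec, hpre, hx⟩
              · rw [hcand, pvFallback_none cols (cols.map pvNorm) 0 ?_]
                · rw [pvAlt_eq, pvBestOf_none cols 0 ?_]
                  · rfl
                  · intro c hc
                    obtain ⟨n1, n2, n3, n4, n5, n6⟩ := hne c hc
                    exact pvRk_none_of _ (hall c hc) n1 n2 n3 n4 n5 n6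
                · intro c hc
                  obtain ⟨c', hc', rfl⟩ := List.mem_map.mp hc
                  exact hall c' hc'
              · have hxr : pvRk (pvNorm x) = some 6 := by
                  obtain ⟨n1, n2, n3, n4, n5, n6⟩ := hne x (hdec ▸ List.mem_append_right _ List.mem_cons_self)
                  exact pvRk_six_of _ hx n1 n2 n3 n4 n5 n6
                have hA : pvAFallback cols (PySem.List.enumerate cand) = some x := by
                  rw [hcand, hdec, List.map_append, List.map_cons]
                  rw [pvFallback_some (pre ++ x :: suf) (pre.map pvNorm) (pvNorm x) (suf.map pvNorm) 0 ?_ hx]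
                  · rw [List.length_map]
                    rw [show ((0 : Int) + pre.length) = (pre.length : Int) by omega]
                    exact PySem.List.pyGet?_append_length pre suf x
                  · intro c hc
                    obtain ⟨c', hc', rfl⟩ := List.mem_map.mp hc
                    exact hpre c' hc'
                rw [hA, pvAlt_eq, hdec]
                rw [pvBestOf_eq pre x suf 0 6 hxr ?_ ?_]
                · rfl
                · intro c hc r' hr'
                  obtain ⟨n1, n2, n3, n4, n5, n6⟩ := hne c (hdec ▸ List.mem_append_left _ hc)
                  rw [pvRk_none_of _ (hpre c hc) n1 n2 n3 n4 n5 n6] at hr'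
                  cases hr'
                · intro c hc r' hr'
                  obtain ⟨hb0, hb6⟩ := pvRk_bounds _ _ hr'
                  obtain ⟨n1, n2, n3, n4, n5, n6⟩ := hne c (hdec ▸ List.mem_append_right _ (List.mem_cons_of_mem _ hc))
                  by_contra hlt
                  rw [not_le] at hlt
                  interval_cases r'
                  · exact n1 ((pvRk_eq0 _).mp hr')
                  · exact n2 ((pvRk_eq1 _).mp hr')
                  · exact n3 ((pvRk_eq2 _).mp hr')
                  · exact n4 ((pvRk_eq3 _).mp hr')
                  · exact n5 ((pvRk_eq4 _).mp hr')
                  · exact n6 ((pvRk_eq5 _).mp hr')
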